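-- pv_equiv track=rewrite | github.com/adeisbright/daily-byte | day_17/minimum-removal.py | get_minimum_removal
-- ===== SOURCE A (Python) =====
-- def get_minimum_removal(arr):
--     removal_count = 0
--
--     left = 0
--     right = len(arr) - 1
--
--     while left < right :
--         mid = left + (right - left) // 2
--
--
--         if  (arr[mid] <  arr[mid -1 ] or  arr[mid] > arr[mid + 1]) and mid >= 1 :
--             removal_count += 1
--         if arr[mid] > arr[mid -1 ] and arr[mid] > arr[mid + 1] :
--             return removal_count
--         elif  arr[mid] < arr[mid + 1] :
--             left = mid + 1
--         else :
--             right = mid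
--
--     return removal_count
-- ===== SOURCE B (Python) =====
-- def get_minimum_removal(arr):
--     def go(left, right, count):
--         if left >= right:
--             return count
--         mid = (left + right) // 2
--         prev, cur, nxt = arr[mid - 1], arr[mid], arr[mid + 1]
--         if mid >= 1 and (cur < prev or cur > nxt):
--             count += 1
--         if cur > prev and cur > nxt:
--             return count
--         if cur < nxt:
--             return go(mid + 1, right, count)
--         return go(left, mid, count)
--     return go(0, len(arr) - 1, 0)
-- ===== Notes on version B (the rewrite author's own statement) =====
-- stated objective: alternative
-- what changed: Replaced the while-loop with mutable left/right/removal_count state by a tail-recursive helper go(left, right, count) with early returns and a symmetric midpoint formula (left+right)//2, reading the three neighbours once per step.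
import Mathlib
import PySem

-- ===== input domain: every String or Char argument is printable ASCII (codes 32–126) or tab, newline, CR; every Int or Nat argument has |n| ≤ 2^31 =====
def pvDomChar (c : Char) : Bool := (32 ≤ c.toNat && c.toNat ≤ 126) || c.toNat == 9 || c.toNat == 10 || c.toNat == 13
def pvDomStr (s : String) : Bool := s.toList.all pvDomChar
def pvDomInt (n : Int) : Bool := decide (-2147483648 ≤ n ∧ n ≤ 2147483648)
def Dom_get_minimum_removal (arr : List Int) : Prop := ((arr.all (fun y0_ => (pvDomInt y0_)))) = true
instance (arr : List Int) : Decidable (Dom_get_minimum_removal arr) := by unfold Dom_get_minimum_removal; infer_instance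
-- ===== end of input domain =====

-- B replaces A's while-loop over mutable left/right/count state by a tail-recursive
-- helper with early returns and the symmetric midpoint formula (a different decomposition,
-- same cost); return values proved equal on all inputs.


-- ===== PORT A =====
-- A's while-loop, state (removal_count, left, right); structural recursion on a fuel
-- that only makes totality evident (the interval shrinks every iteration, so
-- fuel = arr.length ≥ right - left iterations is never exhausted).  Indices use pyGetD
-- (Python negative-index semantics: arr[mid-1] at mid = 0 reads arr[-1], the last element).
def pvLoopA (arr : List Int) : Nat → Int → Int → Int → Int
  | 0, removal_count, _left, _right => removal_count
  | fuel + 1, removal_count, left, right =>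
    if left < right then
      let mid := left + PySem.Int.floordiv (right - left) 2
      let removal_count :=
        if (PySem.List.pyGetD arr mid 0 < PySem.List.pyGetD arr (mid - 1) 0 ∨
            PySem.List.pyGetD arr mid 0 > PySem.List.pyGetD arr (mid + 1) 0) ∧ mid ≥ 1 then
          removal_count + 1
        else removal_count
      if PySem.List.pyGetD arr mid 0 > PySem.List.pyGetD arr (mid - 1) 0 ∧
         PySem.List.pyGetD arr mid 0 > PySem.List.pyGetD arr (mid + 1) 0 then
        removal_count
      else if PySem.List.pyGetD arr mid 0 < PySem.List.pyGetD arr (mid + 1) 0 then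
        pvLoopA arr fuel removal_count (mid + 1) right
      else
        pvLoopA arr fuel removal_count left mid
    else removal_count

def get_minimum_removal (arr : List Int) : Int :=
  pvLoopA arr arr.length 0 0 ((arr.length : Int) - 1)

-- ===== PORT B =====
-- B's recursive helper go(left, right, count): early returns, midpoint (left+right)//2,
-- the three neighbours read once into locals; same fuel argument for totality.
def pvGoB (arr : List Int) : Nat → Int → Int → Int → Int
  | 0, _left, _right, count => count
  | fuel + 1, left, right, count =>
    if left ≥ right then count
    else
      let mid := PySem.Int.floordiv (left + right) 2
      let prev := PySem.List.pyGetD arr (mid - 1) 0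
      let cur := PySem.List.pyGetD arr mid 0
      let nxt := PySem.List.pyGetD arr (mid + 1) 0
      let count := if mid ≥ 1 ∧ (cur < prev ∨ cur > nxt) then count + 1 else count
      if cur > prev ∧ cur > nxt then count
      else if cur < nxt then pvGoB arr fuel (mid + 1) right count
      else pvGoB arr fuel left mid count

def get_minimum_removal_alt (arr : List Int) : Int :=
  pvGoB arr arr.length 0 ((arr.length : Int) - 1) 0

-- ===== PRECONDITION & SPEC =====
def Spec_get_minimum_removal (arr : List Int) (out : Int) : Prop := out = get_minimum_removal_alt arr
instance (arr : List Int) (out : Int) : Decidable (Spec_get_minimum_removal arr out) := by unfold Spec_get_minimum_removal; infer_instance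

-- ===== CLAIM (what is proved, stated in full; the proofs are below) =====
def Claim_equal_get_minimum_removal : Prop := ∀ (arr : List Int), Dom_get_minimum_removal arr → Spec_get_minimum_removal arr (get_minimum_removal arr)

-- ===== LEMMAS AND PROOFS =====

-- the two midpoint formulas agree (floor division: adding left·2/2 inside)
theorem pv_mid_eq (left right : Int) :
    left + PySem.Int.floordiv (right - left) 2 = PySem.Int.floordiv (left + right) 2 := by
  rw [PySem.Int.floordiv_eq_ediv_of_pos (by norm_num),
      PySem.Int.floordiv_eq_ediv_of_pos (by norm_num)]
  omega

theorem pvLoopA_eq_pvGoB (arr : List Int) (fuel : Nat) :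
    ∀ (count left right : Int),
      pvLoopA arr fuel count left right = pvGoB arr fuel left right count := by
  induction fuel with
  | zero => intro count left right; rfl
  | succ n ih =>
      intro count left right
      by_cases hlr : left < right
      · rw [pvLoopA, pvGoB, if_pos hlr, if_neg (by omega : ¬ left ≥ right)]
        simp only [← pv_mid_eq left right]
        split_ifs <;> first | rfl | (exact ih _ _ _) | tauto
      · rw [pvLoopA, pvGoB, if_neg hlr, if_pos (by omega : left ≥ right)]

-- ===== VERDICT (by name: the statement is the Claim_ definition above) =====
theorem get_minimum_removal_spec : Claim_equal_get_minimum_removal := by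
  intro arr _
  unfold Spec_get_minimum_removal get_minimum_removal get_minimum_removal_alt
  exact pvLoopA_eq_pvGoB arr arr.length 0 0 ((arr.length : Int) - 1)
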